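-- pv_equiv track=rewrite | github.com/geekychris/amiga_mcp | amiga-devbench/amiga_devbench/disasm.py | _movem_reglist
-- ===== SOURCE A (Python) =====
-- def _movem_reglist(mask: int, reverse: bool = False) -> str:
--     """Format a MOVEM register list mask."""
--     if reverse:
--         # For predecrement mode, bits are reversed
--         new_mask = 0
--         for i in range(16):
--             if mask & (1 << i):
--                 new_mask |= 1 << (15 - i)
--         mask = new_mask
--
--     regs: list[str] = []
--     # D0-D7 (bits 0-7), A0-A7 (bits 8-15)
--     for prefix, base_bit in [("D", 0), ("A", 8)]:
--         i = 0
--         while i < 8: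
--             if mask & (1 << (base_bit + i)):
--                 start = i
--                 while i < 7 and mask & (1 << (base_bit + i + 1)):
--                     i += 1
--                 if i > start:
--                     regs.append(f"{prefix}{start}-{prefix}{i}")
--                 else:
--                     regs.append(f"{prefix}{start}")
--             i += 1
--     return "/".join(regs) if regs else "0"
-- ===== SOURCE B (Python) =====
-- def _movem_reglist(mask: int, reverse: bool = False) -> str:
--     """Format a MOVEM register list mask."""
--     if reverse:
--         # For predecrement mode, bits are reversed
--         new_mask = 0
--         for i in range(16):
--             if mask & (1 << i):
--                 new_mask |= 1 << (15 - i)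
--         mask = new_mask
--
--     regs: list[str] = []
--     for prefix, base_bit in [("D", 0), ("A", 8)]:
--         # registers present in this block
--         present = [i for i in range(8) if mask & (1 << (base_bit + i))]
--         # group them into maximal consecutive runs [start, end]
--         runs: list[list[int]] = []
--         for i in present:
--             if runs and runs[-1][1] == i - 1:
--                 runs[-1][1] = i
--             else:
--                 runs.append([i, i])
--         for start, end in runs:
--             regs.append(f"{prefix}{start}" if start == end else f"{prefix}{start}-{prefix}{end}")
--     return "/".join(regs) if regs else "0"
-- ===== Notes on version B (the rewrite author's own statement) =====
-- stated objective: idiomatic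
-- what changed: Replaces A's nested while-loops that scan bit positions (with an inner run-extending scan and an index jump) by, per block, materializing the list of present register indices with a comprehension and grouping them into maximal consecutive runs with a single fold that extends or opens the last run.
import Mathlib
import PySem

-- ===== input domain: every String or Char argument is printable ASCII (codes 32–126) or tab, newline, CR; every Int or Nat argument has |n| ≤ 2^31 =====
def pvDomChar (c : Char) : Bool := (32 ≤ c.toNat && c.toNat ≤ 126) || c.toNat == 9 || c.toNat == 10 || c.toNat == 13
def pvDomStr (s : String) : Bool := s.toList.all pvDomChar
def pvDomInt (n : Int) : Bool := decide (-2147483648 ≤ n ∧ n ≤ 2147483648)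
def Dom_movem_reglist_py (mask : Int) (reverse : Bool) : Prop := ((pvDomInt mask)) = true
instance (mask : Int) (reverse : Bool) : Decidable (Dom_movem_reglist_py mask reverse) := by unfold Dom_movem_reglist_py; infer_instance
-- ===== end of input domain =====

-- B replaces A's nested while-scan over bit positions by: materialize the list of present
-- register indices per block, then group maximal consecutive runs with a single fold.

-- ===== PORT A =====
-- truthiness of Python's 'mask & (1 << k)' (this exact expression occurs in both sources)
def movemBit (mask : Int) (k : Nat) : Bool := PySem.Int.band mask ((1 : Int) <<< k) != 0

-- the 16-bit reversal prelude (textually identical in both sources)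
def movemRevMask (mask : Int) : Int :=
  (List.range 16).foldl
    (fun new_mask i => if movemBit mask i then PySem.Int.bor new_mask ((1 : Int) <<< (15 - i)) else new_mask) 0

-- inner 'while i < 7 and mask & (1 << (base_bit + i + 1)): i += 1'
def movemRunEndA (mask : Int) (base i : Nat) : Nat :=
  if h : i < 7 ∧ movemBit mask (base + i + 1) = true then movemRunEndA mask base (i + 1) else i
  termination_by 7 - i
  decreasing_by omega

theorem movemRunEndA_ge (mask : Int) (base i : Nat) : i ≤ movemRunEndA mask base i := by
  fun_induction movemRunEndA <;> omega

-- outer 'while i < 8' loop of A, appending to regs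
def movemScanA (mask : Int) (pfx : String) (base i : Nat) (regs : List String) : List String :=
  if i < 8 then
    if movemBit mask (base + i) then
      let start := i
      let j := movemRunEndA mask base i
      let regs' := regs ++ [if start < j then
          pfx ++ PySem.Int.toStr (start : Int) ++ "-" ++ pfx ++ PySem.Int.toStr (j : Int)
        else pfx ++ PySem.Int.toStr (start : Int)]
      movemScanA mask pfx base (j + 1) regs'
    else movemScanA mask pfx base (i + 1) regs
  else regs
  termination_by 8 - i
  decreasing_by
  · have := movemRunEndA_ge mask base i; omega
  · omega

def movem_reglist_py (mask : Int) (reverse : Bool) : String :=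
  let mask := if reverse then movemRevMask mask else mask
  let regs : List String := []
  let regs := movemScanA mask "D" 0 0 regs
  let regs := movemScanA mask "A" 8 0 regs
  if regs ≠ [] then PySem.Str.join "/" regs else "0"

-- ===== PORT B =====
-- one step of B's run grouping: 'if runs and runs[-1][1] == i - 1: runs[-1][1] = i else: runs.append([i, i])'
-- (the list with a mutable last element is kept head-first, reversed once at the end)
def movemRunsAux (runs : List (Nat × Nat)) (i : Nat) : List (Nat × Nat) :=
  match runs with
  | (s, e) :: rest => if (e : Int) == (i : Int) - 1 then (s, i) :: rest else (i, i) :: (s, e) :: rest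
  | [] => [(i, i)]

-- one (prefix, base_bit) block of B
def movemBlockB (mask : Int) (pfx : String) (base : Nat) : List String :=
  let present := (List.range 8).filter (fun i => movemBit mask (base + i))
  let runs := (present.foldl movemRunsAux []).reverse
  runs.map (fun se => if se.1 == se.2 then pfx ++ PySem.Int.toStr (se.1 : Int)
      else pfx ++ PySem.Int.toStr (se.1 : Int) ++ "-" ++ pfx ++ PySem.Int.toStr (se.2 : Int))

def movem_reglist_py_alt (mask : Int) (reverse : Bool) : String :=
  let mask := if reverse then movemRevMask mask else mask
  let regs := movemBlockB mask "D" 0 ++ movemBlockB mask "A" 8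
  if regs ≠ [] then PySem.Str.join "/" regs else "0"

-- ===== PRECONDITION & SPEC =====
def Spec_movem_reglist_py (mask : Int) (reverse : Bool) (out : String) : Prop := out = movem_reglist_py_alt mask reverse
instance (mask : Int) (reverse : Bool) (out : String) : Decidable (Spec_movem_reglist_py mask reverse out) := by unfold Spec_movem_reglist_py; infer_instance

-- ===== CLAIM (what is proved, stated in full; the proofs are below) =====
def Claim_equal_movem_reglist_py : Prop := ∀ (mask : Int) (reverse : Bool), Dom_movem_reglist_py mask reverse → Spec_movem_reglist_py mask reverse (movem_reglist_py mask reverse)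

-- ===== LEMMAS AND PROOFS =====

-- how A formats one run (s, e) with s ≤ e
def movemFmtA (pfx : String) (se : Nat × Nat) : String :=
  if se.1 < se.2 then pfx ++ PySem.Int.toStr (se.1 : Int) ++ "-" ++ pfx ++ PySem.Int.toStr (se.2 : Int)
  else pfx ++ PySem.Int.toStr (se.1 : Int)

theorem movemRunEndA_le (mask : Int) (base i : Nat) (h : i ≤ 7) : movemRunEndA mask base i ≤ 7 := by
  fun_induction movemRunEndA <;> omega

theorem movemRunEndA_bits (mask : Int) (base i : Nat) (hb : movemBit mask (base + i) = true) :
    ∀ k, i ≤ k → k ≤ movemRunEndA mask base i → movemBit mask (base + k) = true := by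
  fun_induction movemRunEndA with
  | case1 i h ih =>
    intro k hk1 hk2
    rcases Nat.eq_or_lt_of_le hk1 with rfl | hlt
    · exact hb
    · exact ih h.2 k hlt hk2
  | case2 i h =>
    intro k hk1 hk2
    have : k = i := le_antisymm hk2 hk1
    subst this; exact hb

theorem movemRunEndA_stop (mask : Int) (base i : Nat) (h : i ≤ 7) :
    movemRunEndA mask base i = 7 ∨ movemBit mask (base + movemRunEndA mask base i + 1) = false := by
  fun_induction movemRunEndA with
  | case1 i h' ih => exact ih (by omega)
  | case2 i h' =>
    by_cases hi : i = 7
    · exact Or.inl hi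
    · right
      have : ¬ movemBit mask (base + i + 1) = true := fun hb => h' ⟨by omega, hb⟩
      simpa using this

-- the fold only touches the head of the stack: anything below is inert
theorem movemRunsAux_frame : ∀ (ys : List Nat) (a : Nat × Nat) (acc rest : List (Nat × Nat)),
    List.foldl movemRunsAux ((a :: acc) ++ rest) ys = (List.foldl movemRunsAux (a :: acc) ys) ++ rest := by
  intro ys
  induction ys with
  | nil => intro a acc rest; rfl
  | cons y ys ih =>
    intro a acc rest
    obtain ⟨s, e⟩ := a
    simp only [List.foldl_cons, movemRunsAux, List.cons_append]
    split
    · exact ih (s, y) acc rest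
    · exact ih (y, y) ((s, e) :: acc) rest

-- absorbing a consecutive ascending run into the open head run
theorem movemRunsAux_run : ∀ (k s e : Nat) (rest : List (Nat × Nat)),
    List.foldl movemRunsAux ((s, e) :: rest) (List.range' (e + 1) k) = (s, e + k) :: rest := by
  intro k
  induction k with
  | zero => simp
  | succ k ih =>
    intro s e rest
    rw [List.range'_succ]
    simp only [List.foldl_cons, movemRunsAux]
    have hc : ((e : Int) == ((e + 1 : Nat) : Int) - 1) = true := by
      simp
    rw [hc]
    simp only [if_true]
    rw [show e + (k + 1) = e + 1 + k by omega]
    exact ih s (e + 1) rest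

-- every run the fold produces has start ≤ end
theorem movemRuns_le : ∀ (present : List Nat) (acc : List (Nat × Nat)),
    (∀ se ∈ acc, se.1 ≤ se.2) → ∀ se ∈ List.foldl movemRunsAux acc present, se.1 ≤ se.2 := by
  intro present
  induction present with
  | nil => intro acc h; simpa using h
  | cons y ys ih =>
    intro acc h
    simp only [List.foldl_cons]
    refine ih _ ?_
    match acc with
    | [] =>
      intro se hse
      simp only [movemRunsAux] at hse
      simp at hse; simp [hse]
    | (s, e) :: rest =>
      intro se hse
      simp only [movemRunsAux] at hse
      split at hse
      · rename_i hc
        have he : (e : Int) = (y : Int) - 1 := by simpa using hc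
        have hsy : s ≤ y := by
          have := h (s, e) (by simp)
          simp at this; omega
        rcases List.mem_cons.mp hse with rfl | hmem
        · simpa using hsy
        · exact h se (by simp [hmem])
      · rcases List.mem_cons.mp hse with rfl | hmem
        · simp
        · exact h se (by simpa using hmem)

theorem movemScanA_eq (mask : Int) (pfx : String) (base : Nat) :
    ∀ (fuel i : Nat) (regs : List String), 8 ≤ fuel + i →
    movemScanA mask pfx base i regs =
      regs ++ ((((List.range' i (8 - i)).filter (fun j => movemBit mask (base + j))).foldl movemRunsAux []).reverse.map (movemFmtA pfx)) := by
  intro fuel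
  induction fuel with
  | zero =>
    intro i regs h
    rw [movemScanA]
    have hni : ¬ i < 8 := by omega
    simp [hni, show 8 - i = 0 by omega]
  | succ fuel ih =>
    intro i regs h
    by_cases hi : i < 8
    · rw [movemScanA]
      simp only [hi, if_true]
      by_cases hb : movemBit mask (base + i) = true
      · simp only [hb, if_true]
        set j := movemRunEndA mask base i with hj
        have hij : i ≤ j := movemRunEndA_ge mask base i
        have hj7 : j ≤ 7 := movemRunEndA_le mask base i (by omega)
        have hrange : List.range' i (8 - i) = List.range' i (j + 1 - i) ++ List.range' (j + 1) (7 - j) := by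
          have h1 := @List.range'_append i (j + 1 - i) (7 - j) 1
          rw [show i + 1 * (j + 1 - i) = j + 1 by omega] at h1
          rw [show (j + 1 - i) + (7 - j) = 8 - i by omega] at h1
          exact h1.symm
        have hfilt1 : (List.range' i (j + 1 - i)).filter (fun k => movemBit mask (base + k)) = List.range' i (j + 1 - i) := by
          apply List.filter_eq_self.mpr
          intro x hx
          have hx' := List.mem_range'_1.mp hx
          exact movemRunEndA_bits mask base i hb x (by omega) (by omega)
        have hfold1 : List.foldl movemRunsAux [] (List.range' i (j + 1 - i)) = [(i, j)] := by
          rw [show j + 1 - i = (j - i) + 1 by omega, List.range'_succ]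
          simp only [List.foldl_cons, movemRunsAux]
          have hrun := movemRunsAux_run (j - i) i i []
          rw [show i + (j - i) = j by omega] at hrun
          exact hrun
        have hy : ∀ y ∈ (List.range' (j + 1) (7 - j)).filter (fun k => movemBit mask (base + k)), y ≠ j + 1 := by
          intro y hmem hyj
          rcases movemRunEndA_stop mask base i (by omega) with h7 | hf
          · rw [← hj] at h7
            have := (List.mem_filter.mp hmem).1
            rw [h7] at this
            simp at this
          · rw [← hj] at hf
            have hbt := (List.mem_filter.mp hmem).2
            rw [hyj, show base + (j + 1) = base + j + 1 by omega] at hbt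
            rw [hf] at hbt
            simp at hbt
        have hpop : ∀ P2f, (∀ y ∈ P2f, y ≠ j + 1) →
            List.foldl movemRunsAux [(i, j)] P2f = List.foldl movemRunsAux [] P2f ++ [(i, j)] := by
          intro P2f hP2
          cases P2f with
          | nil => simp
          | cons y ys =>
            have hy1 : y ≠ j + 1 := hP2 y (by simp)
            simp only [List.foldl_cons, movemRunsAux]
            have hc : ((j : Int) == (y : Int) - 1) = false := by
              simp only [beq_eq_false_iff_ne, ne_eq]
              omega
            rw [hc]
            simp only [Bool.false_eq_true, if_false]
            exact movemRunsAux_frame ys (y, y) [] [(i, j)]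
        rw [ih (j + 1) _ (by omega)]
        rw [hrange, List.filter_append, hfilt1, List.foldl_append, hfold1, hpop _ hy]
        rw [List.reverse_append]
        simp only [List.reverse_cons, List.reverse_nil, List.nil_append, List.map_cons,
          List.append_assoc, List.cons_append]
        rw [show 8 - (j + 1) = 7 - j by omega]
        simp [movemFmtA]
      · simp only [hb, Bool.false_eq_true, if_false]
        rw [ih (i + 1) regs (by omega)]
        congr 2
        rw [show 8 - i = (7 - i) + 1 by omega, List.range'_succ,
            List.filter_cons_of_neg (by simpa using hb), show 8 - (i + 1) = 7 - i by omega]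
    · rw [movemScanA]
      simp [hi, show 8 - i = 0 by omega]

theorem movemBlockB_eq (mask : Int) (pfx : String) (base : Nat) :
    movemBlockB mask pfx base =
      ((((List.range' 0 8).filter (fun j => movemBit mask (base + j))).foldl movemRunsAux []).reverse.map (movemFmtA pfx)) := by
  unfold movemBlockB
  rw [List.range_eq_range']
  apply List.map_congr_left
  intro se hse
  have hle : se.1 ≤ se.2 :=
    movemRuns_le _ [] (by simp) se (List.mem_reverse.mp hse)
  obtain ⟨s, e⟩ := se
  simp only at hle
  unfold movemFmtA
  by_cases hse2 : s = e
  · subst hse2; simp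
  · have hlt : s < e := lt_of_le_of_ne hle hse2
    simp [hlt, hse2]

-- ===== VERDICT (by name: the statement is the Claim_ definition above) =====
theorem movem_reglist_py_spec : Claim_equal_movem_reglist_py := by
  unfold Claim_equal_movem_reglist_py
  intro mask reverse _
  unfold Spec_movem_reglist_py
  simp only [movem_reglist_py, movem_reglist_py_alt]
  set m := if reverse then movemRevMask mask else mask with hm
  have key : movemScanA m "A" 8 0 (movemScanA m "D" 0 0 []) =
      movemBlockB m "D" 0 ++ movemBlockB m "A" 8 := by
    rw [movemScanA_eq m "A" 8 8 0 _ (by omega), movemScanA_eq m "D" 0 8 0 [] (by omega),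
        movemBlockB_eq, movemBlockB_eq]
    simp
  rw [key]
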